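-- pv_equiv track=rewrite | github.com/shadyapoelela-cloud/apex-web | app/coa_engine/knowledge_graph.py | _sections_compatible
-- ===== SOURCE A (Python) =====
-- def _sections_compatible(section_a: str, section_b: str) -> bool:
--     """Check if two sections are compatible (same family)."""
--     FAMILIES = {
--         "asset": {"asset", "current_asset", "fixed_asset", "non_current_asset"},
--         "liability": {"liability", "current_liability", "non_current_liability"},
--         "equity": {"equity"},
--         "revenue": {"revenue", "other_income"},
--         "expense": {"expense", "cogs", "other_expense", "finance_cost"},
--     }
--     a = section_a.lower().strip()
--     b = section_b.lower().strip()
--     if a == b: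
--         return True
--     for _family, members in FAMILIES.items():
--         if a in members and b in members:
--             return True
--     return False
-- ===== SOURCE B (Python) =====
-- _SECTION_FAMILY = {
--     "asset": "asset", "current_asset": "asset", "fixed_asset": "asset",
--     "non_current_asset": "asset",
--     "liability": "liability", "current_liability": "liability",
--     "non_current_liability": "liability",
--     "equity": "equity",
--     "revenue": "revenue", "other_income": "revenue",
--     "expense": "expense", "cogs": "expense", "other_expense": "expense",
--     "finance_cost": "expense",
-- }
--
--
-- def _sections_compatible(section_a: str, section_b: str) -> bool:
--     """Check if two sections are compatible (same family)."""
--     a = section_a.lower().strip()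
--     b = section_b.lower().strip()
--     if a == b:
--         return True
--     fa = _SECTION_FAMILY.get(a)
--     fb = _SECTION_FAMILY.get(b)
--     return fa is not None and fa == fb
-- ===== Notes on version B (the rewrite author's own statement) =====
-- stated objective: simpler
-- what changed: Replaces the per-call loop over FAMILIES with double membership scans by a precomputed reverse table section->family and two direct lookups compared for equality.
import Mathlib
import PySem

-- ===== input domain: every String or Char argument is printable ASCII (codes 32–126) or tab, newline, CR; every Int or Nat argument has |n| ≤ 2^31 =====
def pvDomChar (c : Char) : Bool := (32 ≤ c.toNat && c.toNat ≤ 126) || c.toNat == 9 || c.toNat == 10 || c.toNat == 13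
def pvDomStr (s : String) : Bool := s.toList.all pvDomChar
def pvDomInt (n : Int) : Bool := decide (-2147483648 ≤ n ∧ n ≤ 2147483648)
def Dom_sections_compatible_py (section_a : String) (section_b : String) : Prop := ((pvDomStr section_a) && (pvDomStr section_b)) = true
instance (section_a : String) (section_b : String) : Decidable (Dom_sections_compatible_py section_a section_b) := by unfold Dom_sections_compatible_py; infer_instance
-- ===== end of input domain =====

-- B replaces A's per-call loop over FAMILIES (two membership scans per family) by a
-- precomputed reverse table section -> family and two direct lookups (objective: simpler).

-- ===== PORT A =====
-- the FAMILIES dict of A, in insertion order; each value a Python set literal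
def pvFamiliesA : List (String × PySem.Set String) :=
  [("asset", PySem.Set.ofList ["asset", "current_asset", "fixed_asset", "non_current_asset"]),
   ("liability", PySem.Set.ofList ["liability", "current_liability", "non_current_liability"]),
   ("equity", PySem.Set.ofList ["equity"]),
   ("revenue", PySem.Set.ofList ["revenue", "other_income"]),
   ("expense", PySem.Set.ofList ["expense", "cogs", "other_expense", "finance_cost"])]

-- the 'for _family, members in FAMILIES.items():' loop with its early return
def pvLoopA (a : String) (b : String) : List (String × PySem.Set String) → Bool
  | [] => false
  | (_, members) :: rest =>
      if PySem.Set.contains members a && PySem.Set.contains members b then true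
      else pvLoopA a b rest

def sections_compatible_py (section_a : String) (section_b : String) : Bool :=
  let a := PySem.Str.strip (PySem.Str.lower section_a)
  let b := PySem.Str.strip (PySem.Str.lower section_b)
  if a == b then true
  else pvLoopA a b pvFamiliesA

-- ===== PORT B =====
-- module-level reverse table _SECTION_FAMILY of Source B (a dict literal)
def pvSectionFamily : PySem.Dict String String :=
  PySem.Dict.mk
    [("asset", "asset"), ("current_asset", "asset"), ("fixed_asset", "asset"),
     ("non_current_asset", "asset"),
     ("liability", "liability"), ("current_liability", "liability"),
     ("non_current_liability", "liability"),
     ("equity", "equity"),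
     ("revenue", "revenue"), ("other_income", "revenue"),
     ("expense", "expense"), ("cogs", "expense"), ("other_expense", "expense"),
     ("finance_cost", "expense")]

def sections_compatible_py_alt (section_a : String) (section_b : String) : Bool :=
  let a := PySem.Str.strip (PySem.Str.lower section_a)
  let b := PySem.Str.strip (PySem.Str.lower section_b)
  if a == b then true
  else
    let fa := PySem.Dict.get? pvSectionFamily a
    let fb := PySem.Dict.get? pvSectionFamily b
    fa.isSome && fa == fb

-- ===== PRECONDITION & SPEC =====
def Spec_sections_compatible_py (section_a : String) (section_b : String) (out : Bool) : Prop := out = sections_compatible_py_alt section_a section_b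
instance (section_a : String) (section_b : String) (out : Bool) : Decidable (Spec_sections_compatible_py section_a section_b out) := by unfold Spec_sections_compatible_py; infer_instance

-- ===== CLAIM (what is proved, stated in full; the proofs are below) =====
def Claim_equal_sections_compatible_py : Prop := ∀ (section_a : String) (section_b : String), Dom_sections_compatible_py section_a section_b → Spec_sections_compatible_py section_a section_b (sections_compatible_py section_a section_b)

-- ===== LEMMAS AND PROOFS =====

-- every key of the reverse table / member of any family
def pvKeys : List String :=
  ["asset", "current_asset", "fixed_asset", "non_current_asset",
   "liability", "current_liability", "non_current_liability",
   "equity", "revenue", "other_income",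
   "expense", "cogs", "other_expense", "finance_cost"]

-- a string that is no section name has no family in the reverse table
lemma pvGet_none {x : String} (hx : x ∉ pvKeys) :
    PySem.Dict.get? pvSectionFamily x = none := by
  rw [PySem.Dict.get?_eq_none_iff_not_mem_keys]
  simpa [pvSectionFamily, pvKeys, PySem.Dict.keys] using hx

-- a string that is no section name makes A's scan fail (left argument)
lemma pvLoop_false_left {x y : String} (hx : x ∉ pvKeys) :
    pvLoopA x y pvFamiliesA = false := by
  simp only [pvKeys, List.mem_cons, not_or] at hx
  simp [pvLoopA, pvFamiliesA, PySem.Set.contains, PySem.Set.ofList, hx.1, hx.2.1, hx.2.2.1,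
    hx.2.2.2.1, hx.2.2.2.2.1, hx.2.2.2.2.2.1, hx.2.2.2.2.2.2.1, hx.2.2.2.2.2.2.2.1,
    hx.2.2.2.2.2.2.2.2.1, hx.2.2.2.2.2.2.2.2.2.1, hx.2.2.2.2.2.2.2.2.2.2.1,
    hx.2.2.2.2.2.2.2.2.2.2.2.1, hx.2.2.2.2.2.2.2.2.2.2.2.2.1, hx.2.2.2.2.2.2.2.2.2.2.2.2.2]

-- a string that is no section name makes A's scan fail (right argument)
lemma pvLoop_false_right {x y : String} (hy : y ∉ pvKeys) :
    pvLoopA x y pvFamiliesA = false := by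
  simp only [pvKeys, List.mem_cons, not_or] at hy
  simp [pvLoopA, pvFamiliesA, PySem.Set.contains, PySem.Set.ofList, hy.1, hy.2.1, hy.2.2.1,
    hy.2.2.2.1, hy.2.2.2.2.1, hy.2.2.2.2.2.1, hy.2.2.2.2.2.2.1, hy.2.2.2.2.2.2.2.1,
    hy.2.2.2.2.2.2.2.2.1, hy.2.2.2.2.2.2.2.2.2.1, hy.2.2.2.2.2.2.2.2.2.2.1,
    hy.2.2.2.2.2.2.2.2.2.2.2.1, hy.2.2.2.2.2.2.2.2.2.2.2.2.1, hy.2.2.2.2.2.2.2.2.2.2.2.2.2]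

-- A's family scan equals B's reverse-lookup comparison, for arbitrary normalized strings
lemma pvLoop_eq_lookup (a b : String) :
    pvLoopA a b pvFamiliesA =
      ((PySem.Dict.get? pvSectionFamily a).isSome
        && (PySem.Dict.get? pvSectionFamily a == PySem.Dict.get? pvSectionFamily b)) := by
  by_cases hx : a ∈ pvKeys
  · by_cases hy : b ∈ pvKeys
    · simp only [pvKeys, List.mem_cons, List.not_mem_nil, or_false] at hx hy
      rcases hx with rfl | rfl | rfl | rfl | rfl | rfl | rfl | rfl | rfl | rfl | rfl | rfl | rfl | rfl <;>
        rcases hy with rfl | rfl | rfl | rfl | rfl | rfl | rfl | rfl | rfl | rfl | rfl | rfl | rfl | rfl <;>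
          decide
    · rw [pvLoop_false_right hy, pvGet_none hy]
      cases PySem.Dict.get? pvSectionFamily a <;> simp
  · rw [pvLoop_false_left hx, pvGet_none hx]
    simp

-- ===== VERDICT (by name: the statement is the Claim_ definition above) =====
theorem sections_compatible_py_spec : Claim_equal_sections_compatible_py := by
  intro section_a section_b _
  unfold Spec_sections_compatible_py sections_compatible_py sections_compatible_py_alt
  dsimp only
  split_ifs with h
  · rfl
  · exact pvLoop_eq_lookup _ _
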